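-- pv_equiv track=rewrite | github.com/biscaiadavi/Ra1-30 | ast_parser.py | _eh_literal_real
-- ===== SOURCE A (Python) =====
-- def _eh_literal_real(s: str) -> bool:
--     if s == ".":
--         return False
--     p = 0
--     for ch in s:
--         if ch == ".":
--             p += 1
--             if p > 1:
--                 return False
--         elif not ch.isdigit():
--             return False
--     return True
-- ===== SOURCE B (Python) =====
-- def _eh_literal_real(s: str) -> bool:
--     if s == ".":
--         return False
--     parts = s.split(".")
--     if len(parts) > 2:
--         return False
--     return all(all(c.isdigit() for c in part) for part in parts)
-- ===== Notes on version B (the rewrite author's own statement) =====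
-- stated objective: alternative
-- what changed: Replaced A's single character loop threading a dot-counter with early returns by a split-then-validate decomposition: split the string on '.', reject more than two parts, and check that every part consists only of digits.
import Mathlib
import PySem

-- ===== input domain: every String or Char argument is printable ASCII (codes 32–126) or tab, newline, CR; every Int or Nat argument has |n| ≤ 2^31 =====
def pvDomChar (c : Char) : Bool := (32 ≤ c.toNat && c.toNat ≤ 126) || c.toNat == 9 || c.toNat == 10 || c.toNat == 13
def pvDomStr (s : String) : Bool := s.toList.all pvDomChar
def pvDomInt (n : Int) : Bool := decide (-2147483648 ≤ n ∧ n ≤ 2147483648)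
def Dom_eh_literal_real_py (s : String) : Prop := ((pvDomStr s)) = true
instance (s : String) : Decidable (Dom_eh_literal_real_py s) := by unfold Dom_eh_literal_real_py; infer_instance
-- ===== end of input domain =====

-- B replaces A's counter-threading character loop with a split-then-validate
-- decomposition (split on '.', at most two parts, each part all digits); objective: alternative.

-- ===== PORT A =====
-- the 'for ch in s' loop of A, threading the dot counter p; early 'return False' = result false
def ehGoA : List Char → Nat → Bool
  | [], _ => true
  | c :: cs, p =>
    if c = '.' then
      if p + 1 > 1 then false else ehGoA cs (p + 1)
    else if ¬ (PySem.Chars.isdigit c) then false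
    else ehGoA cs p

def eh_literal_real_py (s : String) : Bool :=
  if s = "." then false else ehGoA s.toList 0

-- ===== PORT B =====
def eh_literal_real_py_alt (s : String) : Bool :=
  if s = "." then false
  else
    let parts := PySem.Chars.splitOn s.toList ['.']   -- parts = s.split(".")
    if parts.length > 2 then false
    else parts.all (fun part => part.all PySem.Chars.isdigit)

-- ===== PRECONDITION & SPEC =====
def Spec_eh_literal_real_py (s : String) (out : Bool) : Prop := out = eh_literal_real_py_alt s
instance (s : String) (out : Bool) : Decidable (Spec_eh_literal_real_py s out) := by unfold Spec_eh_literal_real_py; infer_instance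

-- ===== CLAIM (what is proved, stated in full; the proofs are below) =====
def Claim_equal_eh_literal_real_py : Prop := ∀ (s : String), Dom_eh_literal_real_py s → Spec_eh_literal_real_py s (eh_literal_real_py s)

-- ===== LEMMAS AND PROOFS =====

-- a fuel-free model of splitting a character list on '.'
def spDot : List Char → List (List Char)
  | [] => [[]]
  | c :: r =>
    if c = '.' then [] :: spDot r
    else
      match spDot r with
      | [] => [[c]]
      | p :: ps => (c :: p) :: ps

theorem spDot_ne_nil (l : List Char) : spDot l ≠ [] := by
  cases l with
  | nil => simp [spDot]
  | cons c r =>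
    by_cases hc : c = '.'
    · simp [spDot, hc]
    · simp only [spDot, if_neg hc]
      cases spDot r <;> simp

theorem go_dot_eq : ∀ (fuel : Nat) (l cur : List Char) (acc : List (List Char)),
    l.length < fuel →
    PySem.Chars.splitOn.go ['.'] fuel l cur acc
      = acc.reverse ++ (match spDot l with
                        | [] => []
                        | p :: ps => (cur.reverse ++ p) :: ps) := by
  intro fuel
  induction fuel with
  | zero => intro l cur acc h; omega
  | succ n ih =>
    intro l cur acc h
    cases l with
    | nil => simp [PySem.Chars.splitOn.go, spDot]
    | cons c rest =>
      by_cases hc : c = '.'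
      · subst hc
        rw [show PySem.Chars.splitOn.go ['.'] (n+1) ('.' :: rest) cur acc
              = PySem.Chars.splitOn.go ['.'] n rest [] (cur.reverse :: acc) by
            simp [PySem.Chars.splitOn.go, List.isPrefixOf]]
        rw [ih rest [] (cur.reverse :: acc) (by simpa using h)]
        have := spDot_ne_nil rest
        cases hs : spDot rest with
        | nil => exact absurd hs this
        | cons p ps => simp [spDot, hs]
      · rw [show PySem.Chars.splitOn.go ['.'] (n+1) (c :: rest) cur acc
              = PySem.Chars.splitOn.go ['.'] n rest (c :: cur) acc by
            simp [PySem.Chars.splitOn.go, List.isPrefixOf]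
            exact fun h => absurd h.symm hc]
        rw [ih rest (c :: cur) acc (by simpa using h)]
        have := spDot_ne_nil rest
        cases hs : spDot rest with
        | nil => exact absurd hs this
        | cons p ps => simp [spDot, hs, if_neg hc]

theorem splitOn_dot_eq (l : List Char) : PySem.Chars.splitOn l ['.'] = spDot l := by
  unfold PySem.Chars.splitOn
  rw [go_dot_eq (l.length + 1) l [] [] (by omega)]
  have := spDot_ne_nil l
  cases hs : spDot l with
  | nil => exact absurd hs this
  | cons p ps => simp

theorem spDot_length (l : List Char) : (spDot l).length = l.count '.' + 1 := by
  induction l with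
  | nil => simp [spDot]
  | cons c r ih =>
    by_cases hc : c = '.'
    · simp [spDot, hc, ih]
    · simp only [spDot, if_neg hc]
      cases hs : spDot r with
      | nil => exact absurd hs (spDot_ne_nil r)
      | cons p ps =>
        rw [hs] at ih
        simp at ih ⊢
        simp [hc, ih]

theorem spDot_all (l : List Char) :
    (spDot l).all (fun part => part.all PySem.Chars.isdigit)
      = l.all (fun c => c == '.' || PySem.Chars.isdigit c) := by
  induction l with
  | nil => simp [spDot]
  | cons c r ih =>
    by_cases hc : c = '.'
    · simp [spDot, hc, ih]
    · simp only [spDot, if_neg hc]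
      cases hs : spDot r with
      | nil => exact absurd hs (spDot_ne_nil r)
      | cons p ps =>
        rw [hs] at ih
        have hcb : (c == '.') = false := by simpa using hc
        simp at ih ⊢
        simp [hcb, Bool.and_assoc, ih]

-- characterisation of A's loop
theorem ehGoA_eq (cs : List Char) : ∀ (p : Nat), p ≤ 1 →
    ehGoA cs p = (decide (cs.count '.' + p ≤ 1)
      && cs.all (fun c => c == '.' || PySem.Chars.isdigit c)) := by
  induction cs with
  | nil => intro p hp; simp [ehGoA]; omega
  | cons c t ih =>
    intro p hp
    by_cases hc : c = '.'
    · subst hc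
      by_cases h1 : p + 1 > 1
      · have hp1 : p = 1 := by omega
        subst hp1
        simp [ehGoA]
      · have hp0 : p = 0 := by omega
        subst hp0
        simp only [ehGoA, if_neg h1]
        rw [ih 1 (by omega)]
        simp
    · by_cases hd : PySem.Chars.isdigit c
      · simp only [ehGoA, if_neg hc]
        rw [if_neg (by simp [hd]), ih p hp]
        simp [hc, hd]
      · simp [ehGoA, hc, hd]

-- ===== VERDICT (by name: the statement is the Claim_ definition above) =====
theorem eh_literal_real_py_spec : Claim_equal_eh_literal_real_py := by
  intro s _
  unfold Spec_eh_literal_real_py eh_literal_real_py eh_literal_real_py_alt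
  by_cases hs : s = "."
  · simp [hs]
  · rw [if_neg hs, if_neg hs, ehGoA_eq s.toList 0 (by omega)]
    simp only [splitOn_dot_eq]
    by_cases hcnt : s.toList.count '.' ≤ 1
    · rw [if_neg (by rw [spDot_length]; omega), spDot_all]
      simp [hcnt]
    · rw [if_pos (by rw [spDot_length]; omega)]
      simp; omega
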